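-- pv_equiv track=rewrite | github.com/dttric/zapret | src/core/direct_preset_core/engines/_shared.py | split_preamble_and_profile_lines
-- ===== SOURCE A (Python) =====
-- _MATCH_PREFIXES = (
--     "--filter-",
--     "--hostlist=",
--     "--hostlist-domains=",
--     "--hostlist-exclude=",
--     "--ipset=",
--     "--ipset-exclude=",
--     "--ipset-ip=",
--     "--payload=",
--     "--in-range",
-- )
--
-- _ACTION_PREFIXES = (
--     "--out-range",
--     "--lua-desync=",
--     "--dpi-desync",
--     "--dup",
--     "--wssize",
-- )
--
-- _DIRECTIVE_PREFIXES = (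
--     "--name",
--     "--template",
--     "--import",
--     "--skip",
--     "--cookie",
-- )
--
-- def split_preamble_and_profile_lines(body_lines: list[str]) -> tuple[list[str], list[list[str]]]:
--     preamble: list[str] = []
--     profiles: list[list[str]] = []
--     current: list[str] = []
--     saw_profile = False
--     for raw in body_lines:
--         stripped = raw.strip()
--         if stripped == "--new":
--             if saw_profile:
--                 profiles.append(current)
--                 current = []
--             elif current:
--                 preamble.extend(current)
--                 current = []
--             saw_profile = True
--             continue
--         if not saw_profile and not _looks_like_profile_line(stripped):
--             preamble.append(raw)
--             continue
--         if not saw_profile and _looks_like_profile_line(stripped):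
--             saw_profile = True
--         current.append(raw)
--     if current:
--         if saw_profile:
--             profiles.append(current)
--         else:
--             preamble.extend(current)
--     return preamble, profiles
--
-- def _looks_like_profile_line(stripped: str) -> bool:
--     return any(stripped.startswith(prefix) for prefix in _MATCH_PREFIXES + _ACTION_PREFIXES + _DIRECTIVE_PREFIXES)
-- ===== SOURCE B (Python) =====
-- _MATCH_PREFIXES = (
--     "--filter-",
--     "--hostlist=",
--     "--hostlist-domains=",
--     "--hostlist-exclude=",
--     "--ipset=",
--     "--ipset-exclude=",
--     "--ipset-ip=",
--     "--payload=",
--     "--in-range",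
-- )
--
-- _ACTION_PREFIXES = (
--     "--out-range",
--     "--lua-desync=",
--     "--dpi-desync",
--     "--dup",
--     "--wssize",
-- )
--
-- _DIRECTIVE_PREFIXES = (
--     "--name",
--     "--template",
--     "--import",
--     "--skip",
--     "--cookie",
-- )
--
-- def _looks_like_profile_line(stripped: str) -> bool:
--     return any(stripped.startswith(prefix) for prefix in _MATCH_PREFIXES + _ACTION_PREFIXES + _DIRECTIVE_PREFIXES)
--
-- def _is_boundary(raw: str) -> bool:
--     stripped = raw.strip()
--     return stripped == "--new" or _looks_like_profile_line(stripped)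
--
-- def _profiles_of(rest: list[str]) -> list[list[str]]:
--     # drop a leading '--new' delimiter, then segment on '--new'; the
--     # trailing segment is kept only if non-empty
--     if rest and rest[0].strip() == "--new":
--         rest = rest[1:]
--     segments: list[list[str]] = [[]]
--     for line in rest:
--         if line.strip() == "--new":
--             segments.append([])
--         else:
--             segments[-1].append(line)
--     if not segments[-1]:
--         segments.pop()
--     return segments
--
-- def split_preamble_and_profile_lines(body_lines: list[str]) -> tuple[list[str], list[list[str]]]:
--     i = 0
--     while i < len(body_lines) and not _is_boundary(body_lines[i]):
--         i += 1
--     return body_lines[:i], _profiles_of(body_lines[i:])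
-- ===== Notes on version B (the rewrite author's own statement) =====
-- stated objective: simpler
-- what changed: Replaced A's single stateful loop (preamble/profiles/current/saw_profile juggled together) by two independent phases: a scan to the first boundary line ('--new' or profile-like) yielding the preamble, then a plain '--new'-delimiter segmentation of the remainder with the empty trailing segment dropped.
import Mathlib
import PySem

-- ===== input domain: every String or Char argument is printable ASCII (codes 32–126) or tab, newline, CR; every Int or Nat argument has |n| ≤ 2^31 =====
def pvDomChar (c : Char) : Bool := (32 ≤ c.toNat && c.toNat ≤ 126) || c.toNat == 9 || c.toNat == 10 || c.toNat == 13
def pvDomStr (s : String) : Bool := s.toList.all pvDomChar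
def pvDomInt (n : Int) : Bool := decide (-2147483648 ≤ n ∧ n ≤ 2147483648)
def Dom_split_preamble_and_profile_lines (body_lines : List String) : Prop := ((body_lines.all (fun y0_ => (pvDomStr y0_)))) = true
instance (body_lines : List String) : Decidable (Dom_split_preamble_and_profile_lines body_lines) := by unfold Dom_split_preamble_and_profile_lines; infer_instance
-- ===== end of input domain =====

-- B: two independent phases (preamble scan to the first boundary line, then a plain
-- '--new'-delimiter segmentation) instead of A's single stateful loop; same return value.

-- ===== PORT A =====
def pvPrefixes : List String :=
  ["--filter-", "--hostlist=", "--hostlist-domains=", "--hostlist-exclude=",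
   "--ipset=", "--ipset-exclude=", "--ipset-ip=", "--payload=", "--in-range",
   "--out-range", "--lua-desync=", "--dpi-desync", "--dup", "--wssize",
   "--name", "--template", "--import", "--skip", "--cookie"]

def looksLikeProfileLine (stripped : String) : Bool :=
  pvPrefixes.any (fun p => PySem.Str.startswith stripped p)

def splitLoopA (lines : List String) (pre : List String) (profs : List (List String))
    (cur : List String) (saw : Bool) : List String × List (List String) :=
  match lines with
  | [] =>
      if cur ≠ [] then
        if saw then (pre, profs ++ [cur]) else (pre ++ cur, profs)
      else (pre, profs)
  | raw :: rest =>
      let stripped := PySem.Str.strip raw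
      if stripped = "--new" then
        if saw then splitLoopA rest pre (profs ++ [cur]) [] true
        else if cur ≠ [] then splitLoopA rest (pre ++ cur) profs [] true
        else splitLoopA rest pre profs [] true
      else if !saw && !looksLikeProfileLine stripped then
        splitLoopA rest (pre ++ [raw]) profs cur saw
      else
        splitLoopA rest pre profs (cur ++ [raw]) true

def split_preamble_and_profile_lines (body_lines : List String) :
    List String × List (List String) :=
  splitLoopA body_lines [] [] [] false

-- ===== PORT B =====
def isBoundary (raw : String) : Bool :=
  let stripped := PySem.Str.strip raw
  stripped = "--new" || looksLikeProfileLine stripped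

def segLoop (lines : List String) (done : List (List String)) (cur : List String) :
    List (List String) :=
  match lines with
  | [] => if cur = [] then done else done ++ [cur]
  | l :: rest =>
      if PySem.Str.strip l = "--new" then segLoop rest (done ++ [cur]) []
      else segLoop rest done (cur ++ [l])

def profilesOf (rest : List String) : List (List String) :=
  match rest with
  | [] => segLoop [] [] []
  | r :: rs =>
      if PySem.Str.strip r = "--new" then segLoop rs [] []
      else segLoop (r :: rs) [] []

def split_preamble_and_profile_lines_alt (body_lines : List String) :
    List String × List (List String) :=
  (body_lines.takeWhile (fun l => !isBoundary l),
   profilesOf (body_lines.dropWhile (fun l => !isBoundary l)))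

-- ===== PRECONDITION & SPEC =====
def Spec_split_preamble_and_profile_lines (body_lines : List String) (out : List String × List (List String)) : Prop := out = split_preamble_and_profile_lines_alt body_lines
instance (body_lines : List String) (out : List String × List (List String)) : Decidable (Spec_split_preamble_and_profile_lines body_lines out) := by unfold Spec_split_preamble_and_profile_lines; infer_instance

-- ===== CLAIM (what is proved, stated in full; the proofs are below) =====
def Claim_equal_split_preamble_and_profile_lines : Prop := ∀ (body_lines : List String), Dom_split_preamble_and_profile_lines body_lines → Spec_split_preamble_and_profile_lines body_lines (split_preamble_and_profile_lines body_lines)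

-- ===== LEMMAS AND PROOFS =====

theorem splitLoopA_saw (l : List String) (pre : List String) (profs : List (List String))
    (cur : List String) :
    splitLoopA l pre profs cur true = (pre, segLoop l profs cur) := by
  induction l generalizing profs cur with
  | nil =>
      simp only [splitLoopA, segLoop]
      split_ifs with h h2 <;> simp_all
  | cons x xs ih =>
      simp only [splitLoopA, segLoop, Bool.not_true, Bool.false_and, Bool.false_eq_true,
        if_false]
      split_ifs with h
      · rw [ih]
      · simp only [ih]

theorem splitLoopA_notSaw (l : List String) (pre : List String) :
    splitLoopA l pre [] [] false =
      (pre ++ (split_preamble_and_profile_lines_alt l).1,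
       (split_preamble_and_profile_lines_alt l).2) := by
  induction l generalizing pre with
  | nil => simp [splitLoopA, split_preamble_and_profile_lines_alt, profilesOf, segLoop]
  | cons x xs ih =>
      by_cases h1 : PySem.Str.strip x = "--new"
      · have hb : isBoundary x = true := by simp [isBoundary, h1]
        simp only [splitLoopA, h1, if_true, ne_eq, not_true_eq_false, if_false,
          splitLoopA_saw]
        simp [split_preamble_and_profile_lines_alt, profilesOf, hb, h1]
      · by_cases h2 : looksLikeProfileLine (PySem.Str.strip x) = true
        · have hb : isBoundary x = true := by simp [isBoundary, h2]
          simp only [splitLoopA, h1, if_false, Bool.not_false, Bool.true_and, h2,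
            Bool.not_true, Bool.false_eq_true, splitLoopA_saw]
          simp only [split_preamble_and_profile_lines_alt, List.takeWhile, hb,
            Bool.not_true, List.dropWhile, profilesOf, h1, if_false]
          simp [segLoop, h1]
        · have hb : isBoundary x = false := by simp [isBoundary, h1, h2]
          simp only [splitLoopA, h1, if_false, Bool.not_false, Bool.true_and, h2,
            Bool.false_eq_true]
          rw [ih]
          simp [split_preamble_and_profile_lines_alt, List.takeWhile, List.dropWhile, hb]

-- ===== VERDICT (by name: the statement is the Claim_ definition above) =====
theorem split_preamble_and_profile_lines_spec : Claim_equal_split_preamble_and_profile_lines := by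
  intro body_lines _
  unfold Spec_split_preamble_and_profile_lines split_preamble_and_profile_lines
  rw [splitLoopA_notSaw]
  simp
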